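-- pv_equiv track=rewrite | github.com/sandraverdad/BrailleConnect | braille.py | smart_number_sign_insertion
-- ===== SOURCE A (Python) =====
-- def smart_number_sign_insertion(text):
--     result = ''
--     in_number = False
--     for i, char in enumerate(text):
--         if char.isdigit():
--             if not in_number:
--                 result += '#'
--                 in_number = True
--         else:
--             in_number = False
--         result += char
--     return result
-- ===== SOURCE B (Python) =====
-- def smart_number_sign_insertion(text):
--     # Split the text into maximal runs of same digit-class characters,
--     # then prefix each digit run with '#'.
--     runs = []
--     i = 0
--     n = len(text)
--     while i < n:
--         d = text[i].isdigit()
--         j = i + 1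
--         while j < n and text[j].isdigit() == d:
--             j += 1
--         runs.append(text[i:j])
--         i = j
--     return ''.join('#' + r if r[0].isdigit() else r for r in runs)
-- ===== Notes on version B (the rewrite author's own statement) =====
-- stated objective: alternative
-- what changed: Replaces the character-by-character in_number flag scan with an explicit run decomposition: the text is split into maximal runs of same digit-class characters and each digit run is prefixed with the number sign.
import Mathlib
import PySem

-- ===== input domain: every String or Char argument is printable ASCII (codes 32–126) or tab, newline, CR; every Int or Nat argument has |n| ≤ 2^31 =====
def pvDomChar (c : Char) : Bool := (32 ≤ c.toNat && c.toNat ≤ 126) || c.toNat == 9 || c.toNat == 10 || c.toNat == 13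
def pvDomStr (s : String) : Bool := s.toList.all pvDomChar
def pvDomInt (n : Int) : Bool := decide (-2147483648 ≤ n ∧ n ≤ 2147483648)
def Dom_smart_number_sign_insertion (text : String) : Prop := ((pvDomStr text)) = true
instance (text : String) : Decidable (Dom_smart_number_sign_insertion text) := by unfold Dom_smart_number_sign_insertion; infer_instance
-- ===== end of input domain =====

-- B replaces A's character-by-character in_number flag scan with an explicit maximal-run decomposition (alternative decomposition, same cost).

-- ===== PORT A =====
-- one iteration of A's loop body: state = (result, in_number), element = (i, char)
def pvStepA (st : List Char × Bool) (p : Int × Char) : List Char × Bool :=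
  let result := st.1
  let in_number := st.2
  let c := p.2
  if PySem.Chars.isdigit c then
    if !in_number then (result ++ ['#'] ++ [c], true)
    else (result ++ [c], true)
  else (result ++ [c], false)

def smart_number_sign_insertion (text : String) : String :=
  String.ofList ((PySem.List.enumerate text.toList 0).foldl pvStepA ([], false)).1

-- ===== PORT B =====
-- Source B's run splitter: the inner while-loop scanning chars of equal digit-class is takeWhile/dropWhile
def pvRunsB (cs : List Char) : List (List Char) :=
  match cs with
  | [] => []
  | c :: rest =>
    let d := PySem.Chars.isdigit c
    (c :: rest.takeWhile (fun x => PySem.Chars.isdigit x == d)) ::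
      pvRunsB (rest.dropWhile (fun x => PySem.Chars.isdigit x == d))
termination_by cs.length
decreasing_by
  simp only [List.length_cons]
  exact Nat.lt_succ_of_le (List.length_dropWhile_le _ _)

-- '#' + r if r[0].isdigit() else r
def pvMark (r : List Char) : List Char :=
  match r with
  | [] => []
  | h :: _ => if PySem.Chars.isdigit h then '#' :: r else r

def smart_number_sign_insertion_alt (text : String) : String :=
  String.ofList (((pvRunsB text.toList).map pvMark).flatten)

-- ===== PRECONDITION & SPEC =====
def Spec_smart_number_sign_insertion (text : String) (out : String) : Prop := out = smart_number_sign_insertion_alt text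
instance (text : String) (out : String) : Decidable (Spec_smart_number_sign_insertion text out) := by unfold Spec_smart_number_sign_insertion; infer_instance

-- ===== CLAIM (what is proved, stated in full; the proofs are below) =====
def Claim_equal_smart_number_sign_insertion : Prop := ∀ (text : String), Dom_smart_number_sign_insertion text → Spec_smart_number_sign_insertion text (smart_number_sign_insertion text)

-- ===== LEMMAS AND PROOFS =====

-- character-wise specification of A's loop output (inn = in_number at loop entry)
def pvOut (cs : List Char) (inn : Bool) : List Char :=
  match cs with
  | [] => []
  | c :: rest =>
    if PySem.Chars.isdigit c then
      (if !inn then ['#', c] else [c]) ++ pvOut rest true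
    else c :: pvOut rest false

theorem pvFoldA (cs : List Char) : ∀ (s : Int) (acc : List Char) (inn : Bool),
    ((PySem.List.enumerate cs s).foldl pvStepA (acc, inn)).1 = acc ++ pvOut cs inn := by
  induction cs with
  | nil => intro s acc inn; simp [PySem.List.enumerate_nil, pvOut]
  | cons c rest ih =>
    intro s acc inn
    rw [PySem.List.enumerate_cons, List.foldl_cons]
    by_cases hd : PySem.Chars.isdigit c
    · cases inn
      · rw [show pvStepA (acc, false) (s, c) = (acc ++ ['#'] ++ [c], true) by
          simp [pvStepA, hd], ih]
        simp [pvOut, hd]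
      · rw [show pvStepA (acc, true) (s, c) = (acc ++ [c], true) by
          simp [pvStepA, hd], ih]
        simp [pvOut, hd]
    · rw [show pvStepA (acc, inn) (s, c) = (acc ++ [c], false) by
        simp [pvStepA, hd], ih]
      simp [pvOut, hd]

theorem pvOut_digits (run : List Char) (rest : List Char)
    (h : ∀ x ∈ run, PySem.Chars.isdigit x = true) :
    pvOut (run ++ rest) true = run ++ pvOut rest true := by
  induction run with
  | nil => rfl
  | cons a t ih =>
    have ha := h a (List.mem_cons_self ..)
    simp only [List.cons_append, pvOut, ha, if_pos]
    simp [ih (fun x hx => h x (List.mem_cons_of_mem _ hx))]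

theorem pvOut_nondigits (run : List Char) (rest : List Char)
    (h : ∀ x ∈ run, PySem.Chars.isdigit x = false) :
    pvOut (run ++ rest) false = run ++ pvOut rest false := by
  induction run with
  | nil => rfl
  | cons a t ih =>
    have ha := h a (List.mem_cons_self ..)
    simp only [List.cons_append, pvOut, ha]
    simp [ih (fun x hx => h x (List.mem_cons_of_mem _ hx))]

-- pvOut ignores the flag when the list is empty or starts with a non-digit
theorem pvOut_indep (rest : List Char) (h : ∀ r ∈ rest.head?, PySem.Chars.isdigit r = false) :
    pvOut rest true = pvOut rest false := by
  cases rest with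
  | nil => rfl
  | cons r rs =>
    have hr := h r rfl
    simp [pvOut, hr]

theorem pvMainN (n : Nat) : ∀ cs : List Char, cs.length ≤ n →
    pvOut cs false = ((pvRunsB cs).map pvMark).flatten := by
  induction n with
  | zero =>
    intro cs hlen
    have : cs = [] := List.eq_nil_of_length_eq_zero (Nat.le_zero.mp hlen)
    subst this
    simp [pvRunsB, pvOut]
  | succ n ih =>
    intro cs hlen
    cases cs with
    | nil => simp [pvRunsB, pvOut]
    | cons c rest =>
      set d := PySem.Chars.isdigit c with hdval
      set p := fun x => PySem.Chars.isdigit x == d with hp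
      have hsplit : rest = rest.takeWhile p ++ rest.dropWhile p :=
        (List.takeWhile_append_dropWhile).symm
      have htake : ∀ x ∈ rest.takeWhile p, PySem.Chars.isdigit x = d := by
        intro x hx
        have := List.mem_takeWhile_imp hx
        simpa [hp] using this
      have hdrop : ∀ r ∈ (rest.dropWhile p).head?, PySem.Chars.isdigit r ≠ d := by
        intro r hr
        have h2 := List.head?_dropWhile_not (p := p) (l := rest)
        rw [hr] at h2
        simpa [hp] using h2
      have hlen' : (rest.dropWhile p).length ≤ n := by
        have := List.length_dropWhile_le p rest
        simp only [List.length_cons] at hlen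
        omega
      have hrec := ih (rest.dropWhile p) hlen'
      rw [pvRunsB]
      simp only [List.map_cons, List.flatten_cons]
      by_cases hd : PySem.Chars.isdigit c
      · have hdt : d = true := by rw [hdval, hd]
        have h1 : pvOut (c :: rest) false
            = '#' :: c :: (rest.takeWhile p ++ pvOut (rest.dropWhile p) true) := by
          conv_lhs => rw [hsplit]
          simp only [pvOut, hd, if_pos, Bool.not_false]
          rw [pvOut_digits _ _ (by intro x hx; rw [htake x hx, hdt])]
          rfl
        have hindep : pvOut (rest.dropWhile p) true = pvOut (rest.dropWhile p) false := by
          apply pvOut_indep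
          intro r hr
          have := hdrop r hr
          rw [hdt] at this
          simpa using this
        rw [h1, hindep, hrec]
        simp [pvMark, hd, hp, hdval]
      · have hdt : d = false := by rw [hdval]; exact Bool.eq_false_iff.mpr hd
        have h1 : pvOut (c :: rest) false
            = c :: (rest.takeWhile p ++ pvOut (rest.dropWhile p) false) := by
          conv_lhs => rw [hsplit]
          simp only [pvOut, hd, if_neg, Bool.not_eq_true]
          rw [pvOut_nondigits _ _ (by intro x hx; rw [htake x hx, hdt])]
        rw [h1, hrec]
        simp [pvMark, hd, hp, hdval]

-- ===== VERDICT (by name: the statement is the Claim_ definition above) =====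
theorem smart_number_sign_insertion_spec : Claim_equal_smart_number_sign_insertion := by
  intro text _
  unfold Spec_smart_number_sign_insertion smart_number_sign_insertion smart_number_sign_insertion_alt
  rw [pvFoldA text.toList 0 [] false, List.nil_append,
    pvMainN text.toList.length text.toList (Nat.le_refl _)]
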